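-- pv_equiv track=rewrite | github.com/toi-uc/sanmoku_narabe | sanmoku_narabe.py | symmetry_node_naname2
-- ===== SOURCE A (Python) =====
-- def symmetry_node_naname2(node):
--     symmetric_node = [0, 0, 0, 0, 0, 0, 0, 0, 0]
--     indexs = [8, 5, 2,
--               7, 4, 1,
--               6, 3, 0]
--     for i, index in enumerate(indexs):
--         symmetric_node[i] = node[index]
--     return symmetric_node
-- ===== SOURCE B (Python) =====
-- def symmetry_node_naname2(node):
--     # anti-diagonal reflection = rotate the board 180 degrees, then transpose
--     rev = [node[8 - k] for k in range(9)]  # 180-degree rotation of the nine cells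
--     out = []
--     for col in zip(rev[0:3], rev[3:6], rev[6:9]):  # transpose of the rotated board
--         out.extend(col)
--     return out
-- ===== Notes on version B (the rewrite author's own statement) =====
-- stated objective: alternative
-- what changed: B drops A's hardcoded nine-entry permutation table and in-place assignment loop, instead composing two staged board transforms: a 180-degree rotation of the nine cells followed by a transpose done with zip over the three row slices.
import Mathlib
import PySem

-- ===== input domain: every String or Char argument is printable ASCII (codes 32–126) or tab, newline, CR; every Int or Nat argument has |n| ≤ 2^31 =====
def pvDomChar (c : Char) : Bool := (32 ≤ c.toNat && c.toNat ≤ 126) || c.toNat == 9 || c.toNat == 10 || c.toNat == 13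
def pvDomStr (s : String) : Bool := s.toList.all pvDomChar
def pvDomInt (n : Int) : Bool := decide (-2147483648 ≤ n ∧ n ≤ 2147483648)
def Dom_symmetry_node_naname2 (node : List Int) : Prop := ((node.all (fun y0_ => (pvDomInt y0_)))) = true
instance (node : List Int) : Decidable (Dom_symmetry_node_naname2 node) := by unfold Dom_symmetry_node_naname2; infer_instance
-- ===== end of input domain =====

-- B replaces A's hardcoded permutation table with two staged board transforms: a 180-degree rotation of the nine cells, then a zip-based transpose of the 3x3 rows (alternative decomposition, same cost).


-- ===== PORT A =====
-- literal port: enumerate over the index table, assigning into a 9-zero list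
def symmetry_node_naname2 (node : List Int) : List Int :=
  (PySem.List.enumerate ([8, 5, 2, 7, 4, 1, 6, 3, 0] : List Int) 0).foldl
    (fun sym p => PySem.List.pySetD sym p.1 (PySem.List.pyGetD node p.2 0))
    [0, 0, 0, 0, 0, 0, 0, 0, 0]

-- ===== PORT B =====
-- zip(xs, ys, zs): truncating three-way zip, ported by hand (exact for lists)
def pvZip3 : List Int → List Int → List Int → List (Int × Int × Int)
  | a :: as, b :: bs, c :: cs => (a, b, c) :: pvZip3 as bs cs
  | _, _, _ => []

-- literal port of Source B: rev = the 180-degree rotation (the comprehension over range(9)),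
-- then transpose via zip of the three row slices, extending out column by column
def symmetry_node_naname2_alt (node : List Int) : List Int :=
  let rev := (PySem.List.pyRange 0 9 1).map (fun k => PySem.List.pyGetD node (8 - k) 0)
  (pvZip3 (PySem.List.slice rev (some 0) (some 3))
          (PySem.List.slice rev (some 3) (some 6))
          (PySem.List.slice rev (some 6) (some 9))).foldl
    (fun out t => out ++ [t.1, t.2.1, t.2.2]) []

-- ===== PRECONDITION & SPEC =====
-- A indexes cells up to the ninth; on lists shorter than nine Python raises IndexError (and so does B).
def Pre_symmetry_node_naname2 (node : List Int) : Prop := 9 ≤ node.length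
instance (node : List Int) : Decidable (Pre_symmetry_node_naname2 node) := by unfold Pre_symmetry_node_naname2; infer_instance
def pvWitness_symmetry_node_naname2 : List Int := [1, 2, 3, 4, 5, 6, 7, 8, 9]

def Spec_symmetry_node_naname2 (node : List Int) (out : List Int) : Prop := out = symmetry_node_naname2_alt node
instance (node : List Int) (out : List Int) : Decidable (Spec_symmetry_node_naname2 node out) := by unfold Spec_symmetry_node_naname2; infer_instance

-- ===== CLAIM =====
def Claim_equal_symmetry_node_naname2 : Prop := ∀ (node : List Int), Dom_symmetry_node_naname2 node → Pre_symmetry_node_naname2 node → Spec_symmetry_node_naname2 node (symmetry_node_naname2 node)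

-- ===== LEMMAS AND PROOFS =====
theorem portA_explicit (a b c d e f g h i : Int) (rest : List Int) :
    symmetry_node_naname2 (a::b::c::d::e::f::g::h::i::rest) = [i,f,c,h,e,b,g,d,a] := by
  rw [symmetry_node_naname2,
    show PySem.List.enumerate ([8,5,2,7,4,1,6,3,0]:List Int) 0
       = [(0,8),(1,5),(2,2),(3,7),(4,4),(5,1),(6,6),(7,3),(8,0)] from by decide]
  simp only [List.foldl_cons, List.foldl_nil,
    show ((0:Int))=((0:Nat):Int) from rfl, show ((1:Int))=((1:Nat):Int) from rfl,
    show ((2:Int))=((2:Nat):Int) from rfl, show ((3:Int))=((3:Nat):Int) from rfl,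
    show ((4:Int))=((4:Nat):Int) from rfl, show ((5:Int))=((5:Nat):Int) from rfl,
    show ((6:Int))=((6:Nat):Int) from rfl, show ((7:Int))=((7:Nat):Int) from rfl,
    show ((8:Int))=((8:Nat):Int) from rfl,
    PySem.List.pySetD_natCast, PySem.List.pyGetD_natCast]
  simp [List.getD, List.set]

theorem portB_explicit (a b c d e f g h i : Int) (rest : List Int) :
    symmetry_node_naname2_alt (a::b::c::d::e::f::g::h::i::rest) = [i,f,c,h,e,b,g,d,a] := by
  unfold symmetry_node_naname2_alt
  rw [show PySem.List.pyRange 0 9 1 = [0,1,2,3,4,5,6,7,8] from by decide]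
  simp only [List.map,
    show ((8:Int)-0) = ((8:Nat):Int) from by decide, show ((8:Int)-1) = ((7:Nat):Int) from by decide,
    show ((8:Int)-2) = ((6:Nat):Int) from by decide, show ((8:Int)-3) = ((5:Nat):Int) from by decide,
    show ((8:Int)-4) = ((4:Nat):Int) from by decide, show ((8:Int)-5) = ((3:Nat):Int) from by decide,
    show ((8:Int)-6) = ((2:Nat):Int) from by decide, show ((8:Int)-7) = ((1:Nat):Int) from by decide,
    show ((8:Int)-8) = ((0:Nat):Int) from by decide,
    PySem.List.pyGetD_natCast]
  simp only [List.getD, List.getElem?_cons_zero, List.getElem?_cons_succ, Option.getD_some]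
  simp only [show (3:Int)=((3:Nat):Int) from rfl, show (6:Int)=((6:Nat):Int) from rfl,
    show (0:Int)=((0:Nat):Int) from rfl, show (9:Int)=((9:Nat):Int) from rfl,
    PySem.List.slice_natCast]
  simp only [List.drop, List.take]
  simp [pvZip3]

-- ===== VERDICT =====
theorem symmetry_node_naname2_spec : Claim_equal_symmetry_node_naname2 := by
  intro node _ hpre
  unfold Pre_symmetry_node_naname2 at hpre
  unfold Spec_symmetry_node_naname2
  rcases node with _ | ⟨a, _ | ⟨b, _ | ⟨c, _ | ⟨d, _ | ⟨e, _ | ⟨f, _ | ⟨g, _ | ⟨h, _ | ⟨i, rest⟩⟩⟩⟩⟩⟩⟩⟩⟩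
  case nil => simp at hpre
  case cons.nil => simp at hpre
  case cons.cons.nil => simp at hpre
  case cons.cons.cons.nil => simp at hpre
  case cons.cons.cons.cons.nil => simp at hpre
  case cons.cons.cons.cons.cons.nil => simp at hpre
  case cons.cons.cons.cons.cons.cons.nil => simp at hpre
  case cons.cons.cons.cons.cons.cons.cons.nil => simp at hpre
  case cons.cons.cons.cons.cons.cons.cons.cons.nil => simp at hpre
  case cons.cons.cons.cons.cons.cons.cons.cons.cons =>
    rw [portA_explicit, portB_explicit]
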